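-- pv_equiv track=rewrite | github.com/orzalro/baekjoon | 백준/Silver/9214. 첫 번째 항/첫 번째 항.py | calc
-- ===== SOURCE A (Python) =====
-- def calc(num):
--     num_str = str(num)
--     if len(num_str) % 2 == 1:
--         return num
--     else:
--         result = ''
--         pre_num = -1
--         for i in range(0, len(num_str), 2):
--             if pre_num != num_str[i + 1]:
--                 result += num_str[i + 1] * int(num_str[i])
--                 pre_num = num_str[i + 1]
--             else:
--                 return num
--         if result == num_str:
--             return num
--         else:
--             return calc(int(result))
-- ===== SOURCE B (Python) =====
-- def calc(num):
--     while True: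
--         s = str(num)
--         if len(s) % 2 == 1:
--             return num
--         it = iter(s)
--         pairs = list(zip(it, it))
--         digits = [d for _, d in pairs]
--         if any(a == b for a, b in zip(digits, digits[1:])):
--             return num
--         result = ''.join(d * int(c) for c, d in pairs)
--         if result == s:
--             return num
--         num = int(result)
-- ===== Notes on version B (the rewrite author's own statement) =====
-- stated objective: alternative
-- what changed: Replaced A's tail recursion by an iterative while-loop whose decode step is a pairs/any/join pipeline (chunk the string into (count,digit) pairs, check all adjacent pair digits with any/zip, build the result with join) instead of A's indexed scan carrying a pre_num accumulator with early returns.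
import Mathlib
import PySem

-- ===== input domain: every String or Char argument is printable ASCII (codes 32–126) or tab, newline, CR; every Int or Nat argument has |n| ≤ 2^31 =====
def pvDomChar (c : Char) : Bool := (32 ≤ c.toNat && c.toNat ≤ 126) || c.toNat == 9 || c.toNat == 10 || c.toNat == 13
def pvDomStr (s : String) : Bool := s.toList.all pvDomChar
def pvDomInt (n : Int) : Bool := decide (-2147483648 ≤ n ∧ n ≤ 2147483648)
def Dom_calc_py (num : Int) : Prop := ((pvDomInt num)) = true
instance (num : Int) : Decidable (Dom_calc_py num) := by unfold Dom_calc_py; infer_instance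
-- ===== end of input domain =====

-- B rewrites A's tail recursion as an iterative loop whose decode step is a pairs/any/join
-- pipeline instead of an indexed scan with a pre_num accumulator (objective: alternative).
-- Both ports totalize the (source-level unbounded) loop/recursion with the same fuel constant;
-- on every input admitted by Pre_ the real chain is a handful of steps, far below the fuel.

-- int(c) for a one-character string c, as both Pythons call it
def pyIntChar (c : Char) : Int := (PySem.Int.ofStr? (String.ofList [c])).getD 0

-- ===== PORT A =====
-- A's "for i in range(0, len(num_str), 2)" with its early "return num" (modelled as none).
-- pre_num starts as the int -1, which compares unequal to every character: modelled as none.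
-- The guard is "i + 1 < s.length": on the even-length strings the caller reaches this is
-- exactly range's "i < len(num_str)" (Python would raise IndexError at s[i+1] otherwise).
def calcAFor (s : List Char) (i : Nat) (result : List Char) (preNum : Option Char) :
    Option (List Char) :=
  if h : i + 1 < s.length then
    if preNum ≠ some (s.getD (i + 1) '0') then
      calcAFor s (i + 2)
        (result ++ List.replicate (pyIntChar (s.getD i '0')).toNat (s.getD (i + 1) '0'))
        (some (s.getD (i + 1) '0'))
    else none
  else some result
  termination_by s.length - i

def calcAGo : Nat → Int → Int
  | 0, num => num
  | fuel + 1, num =>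
    let numStr := PySem.Int.toChars num
    if numStr.length % 2 = 1 then num
    else
      match calcAFor numStr 0 [] none with
      | none => num
      | some result =>
        if result = numStr then num
        else calcAGo fuel ((PySem.Int.ofStr? (String.ofList result)).getD 0)

def calc_py (num : Int) : Int := calcAGo 1000000 num

-- ===== PORT B =====
-- pairs = list(zip(it, it)): consecutive 2-chunks of the string
def chunk2 : List Char → List (Char × Char)
  | c :: d :: rest => (c, d) :: chunk2 rest
  | _ => []

def calcBGo : Nat → Int → Int
  | 0, num => num
  | fuel + 1, num =>
    let s := PySem.Int.toChars num
    if s.length % 2 = 1 then num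
    else
      let pairs := chunk2 s
      let digits := pairs.map (·.2)
      if (digits.zip (digits.drop 1)).any (fun p => p.1 == p.2) then num
      else
        let result := (pairs.map (fun p => List.replicate (pyIntChar p.1).toNat p.2)).flatten
        if result = s then num
        else calcBGo fuel ((PySem.Int.ofStr? (String.ofList result)).getD 0)

def calc_py_alt (num : Int) : Int := calcBGo 1000000 num

-- ===== PRECONDITION & SPEC =====
-- Pre_ excludes only inputs where Python A raises ValueError: a negative num whose str has
-- even length makes A call int('-') on the sign character.
def Pre_calc_py (num : Int) : Prop :=
  0 ≤ num ∨ (PySem.Int.toChars num).length % 2 = 1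
instance (num : Int) : Decidable (Pre_calc_py num) := by unfold Pre_calc_py; infer_instance
def pvWitness_calc_py : Int := 12

def Spec_calc_py (num : Int) (out : Int) : Prop := out = calc_py_alt num
instance (num : Int) (out : Int) : Decidable (Spec_calc_py num out) := by unfold Spec_calc_py; infer_instance

-- ===== CLAIM (what is proved, stated in full; the proofs are below) =====
def Claim_equal_calc_py : Prop := ∀ (num : Int), Dom_calc_py num → Pre_calc_py num → Spec_calc_py num (calc_py num)

-- ===== LEMMAS AND PROOFS =====

-- adjacency violation along the digit list, seeded with the previous pair's digit
def violated : Option Char → List Char → Bool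
  | _, [] => false
  | pre, d :: rest => pre == some d || violated (some d) rest

def decList (t : List Char) : List Char :=
  ((chunk2 t).map (fun p => List.replicate (pyIntChar p.1).toNat p.2)).flatten

theorem zip_any_violated_aux (rest : List Char) :
    ∀ d : Char, (((d :: rest).zip rest).any fun p => p.1 == p.2) = violated (some d) rest := by
  induction rest with
  | nil => intro d; simp [violated]
  | cons e rest ih =>
    intro d
    simp only [List.zip_cons_cons, List.any_cons, violated, ih e]
    cases h : (d == e) <;> simp [h] at *

theorem zip_any_violated (ds : List Char) :
    ((ds.zip (ds.drop 1)).any fun p => p.1 == p.2) = violated none ds := by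
  cases ds with
  | nil => simp [violated]
  | cons d rest =>
    simp only [List.drop_one, List.tail_cons, violated]
    rw [zip_any_violated_aux rest d]
    simp

theorem calcAFor_eq (n : Nat) : ∀ (s : List Char) (i : Nat), s.length - i ≤ n →
    ∀ (acc : List Char) (pre : Option Char),
    calcAFor s i acc pre =
      if violated pre ((chunk2 (s.drop i)).map (·.2)) then none
      else some (acc ++ decList (s.drop i)) := by
  induction n with
  | zero =>
    intro s i hle acc pre
    have hi : s.length ≤ i := by omega
    rw [calcAFor]
    have hdrop : s.drop i = [] := List.drop_eq_nil_of_le hi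
    simp [hdrop, chunk2, violated, decList, show ¬ (i + 1 < s.length) by omega]
  | succ n ih =>
    intro s i hle acc pre
    rw [calcAFor]
    by_cases h : i + 1 < s.length
    · have hi : i < s.length := by omega
      have h1 : i + 1 < s.length := h
      have hd1 : s.drop i = s[i] :: s.drop (i + 1) := List.drop_eq_getElem_cons hi
      have hd2 : s.drop (i + 1) = s[i + 1] :: s.drop (i + 2) := List.drop_eq_getElem_cons h1
      have hga : s.getD i '0' = s[i] := List.getD_eq_getElem s '0' hi
      have hgb : s.getD (i + 1) '0' = s[i + 1] := List.getD_eq_getElem s '0' h1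
      rw [hd1, hd2]
      simp only [chunk2, List.map_cons, violated, decList, List.map_cons, List.flatten_cons]
      simp only [dif_pos h, hga, hgb]
      by_cases hpre : pre = some s[i + 1]
      · simp [hpre]
      · have hrec := ih s (i + 2) (by omega) (acc ++ List.replicate (pyIntChar s[i]).toNat s[i + 1]) (some s[i + 1])
        simp only [if_pos (show pre ≠ some s[i+1] from hpre), hrec, decList]
        have : (pre == some s[i + 1]) = false := by simp [hpre]
        rw [this]
        simp [List.append_assoc]
    · have hdrop_len : (s.drop i).length ≤ 1 := by simp [List.length_drop]; omega
      rw [dif_neg h]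
      match hm : s.drop i with
      | [] => simp [chunk2, violated, decList]
      | [c] => simp [chunk2, violated, decList]
      | c :: d :: rest => rw [hm] at hdrop_len; simp at hdrop_len

theorem calcAFor_head (s : List Char) :
    calcAFor s 0 [] none =
      if violated none ((chunk2 s).map (·.2)) then none else some (decList s) := by
  have := calcAFor_eq s.length s 0 (by omega) [] none
  simpa using this

theorem calcGo_eq (fuel : Nat) : ∀ num : Int, calcAGo fuel num = calcBGo fuel num := by
  induction fuel with
  | zero => intro num; rfl
  | succ fuel ih =>
    intro num
    rw [calcAGo, calcBGo]
    simp only []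
    by_cases hlen : (PySem.Int.toChars num).length % 2 = 1
    · simp [hlen]
    · rw [if_neg hlen, if_neg hlen, calcAFor_head, zip_any_violated]
      by_cases hv : violated none ((chunk2 (PySem.Int.toChars num)).map (·.2)) = true
      · rw [if_pos hv, if_pos hv]
      · rw [if_neg hv, if_neg hv]
        dsimp only [decList]
        split_ifs with hfix
        · rfl
        · exact ih _

-- ===== VERDICT (by name: the statement is the Claim_ definition above) =====
theorem calc_py_spec : Claim_equal_calc_py := by
  intro num _ _
  unfold Spec_calc_py calc_py calc_py_alt
  exact calcGo_eq 1000000 num
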